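-- pv_equiv track=rewrite | github.com/gazelle93/Span-Detection-Using-LSTMs | text_processing.py | get_output_label
-- ===== SOURCE A (Python) =====
-- def get_output_label(input_text, ant_span, con_span):
--     label_list = ["O", "A", "C"]
--     label_dict = {}
--     reverse_label_dict = {}
--     for idx, l in enumerate(label_list):
--         label_dict[idx] = l
--         reverse_label_dict[l] = idx
--
--     output_label = [reverse_label_dict["O"] for x in range(len(input_text))]
--     for idx, _ in enumerate(input_text):
--         if idx in ant_span:
--             output_label[idx] = reverse_label_dict["A"]
--         elif idx in con_span:
--             output_label[idx] = reverse_label_dict["C"]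
--     return output_label, label_dict, reverse_label_dict
-- ===== SOURCE B (Python) =====
-- def get_output_label(input_text, ant_span, con_span):
--     label_dict = {0: "O", 1: "A", 2: "C"}
--     reverse_label_dict = {"O": 0, "A": 1, "C": 2}
--     n = len(input_text)
--     output_label = [0] * n
--     for i in con_span:
--         if 0 <= i < n:
--             output_label[i] = 2
--     for i in ant_span:
--         if 0 <= i < n:
--             output_label[i] = 1
--     return output_label, label_dict, reverse_label_dict
-- ===== Notes on version B (the rewrite author's own statement) =====
-- stated objective: faster
-- what changed: B builds the label dicts as literals and, instead of scanning both span lists for every index (membership test per position), initialises all labels to O and makes one bounds-guarded pass over con_span then ant_span writing the codes directly (ant last preserves the elif precedence).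
import Mathlib
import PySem

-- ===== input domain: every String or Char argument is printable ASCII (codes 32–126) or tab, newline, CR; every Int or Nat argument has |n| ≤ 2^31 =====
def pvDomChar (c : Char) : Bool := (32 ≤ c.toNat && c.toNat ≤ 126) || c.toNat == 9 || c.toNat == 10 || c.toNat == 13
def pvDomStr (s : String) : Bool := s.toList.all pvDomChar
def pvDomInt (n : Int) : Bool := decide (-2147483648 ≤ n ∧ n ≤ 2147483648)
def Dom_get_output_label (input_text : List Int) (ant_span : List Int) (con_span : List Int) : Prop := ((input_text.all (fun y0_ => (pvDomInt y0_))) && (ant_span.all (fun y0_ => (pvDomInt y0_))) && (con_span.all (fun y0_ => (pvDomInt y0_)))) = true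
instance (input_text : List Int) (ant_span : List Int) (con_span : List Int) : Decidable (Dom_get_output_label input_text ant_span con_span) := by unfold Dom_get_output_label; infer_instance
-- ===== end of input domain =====

-- B replaces the per-index scans of both span lists by one bounds-guarded pass over each span list (faster).

-- ===== PORT A =====
def get_output_label (input_text : List Int) (ant_span : List Int) (con_span : List Int) : List Int × (List (Int × String)) × (List (String × Int)) :=
  let label_list : List String := ["O", "A", "C"]
  let dicts := (PySem.List.enumerate label_list).foldl
    (fun (d : PySem.Dict Int String × PySem.Dict String Int) p =>
      (d.1.insert p.1 p.2, d.2.insert p.2 p.1))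
    (PySem.Dict.empty, PySem.Dict.empty)
  let label_dict := dicts.1
  let reverse_label_dict := dicts.2
  let output_label0 := (PySem.List.pyRange 0 (PySem.List.len input_text) 1).map
    (fun _ => reverse_label_dict.getD "O" 0)
  let output_label := (PySem.List.enumerate input_text).foldl
    (fun acc p =>
      if p.1 ∈ ant_span then PySem.List.pySetD acc p.1 (reverse_label_dict.getD "A" 0)
      else if p.1 ∈ con_span then PySem.List.pySetD acc p.1 (reverse_label_dict.getD "C" 0)
      else acc)
    output_label0
  (output_label, label_dict.items, reverse_label_dict.items)

-- ===== PORT B =====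
def get_output_label_alt (input_text : List Int) (ant_span : List Int) (con_span : List Int) : List Int × (List (Int × String)) × (List (String × Int)) :=
  let label_dict : List (Int × String) := [(0, "O"), (1, "A"), (2, "C")]
  let reverse_label_dict : List (String × Int) := [("O", 0), ("A", 1), ("C", 2)]
  let n : Int := input_text.length
  let output_label0 : List Int := List.replicate input_text.length 0
  let output_label1 := con_span.foldl
    (fun acc i => if 0 ≤ i ∧ i < n then PySem.List.pySetD acc i 2 else acc) output_label0
  let output_label2 := ant_span.foldl
    (fun acc i => if 0 ≤ i ∧ i < n then PySem.List.pySetD acc i 1 else acc) output_label1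
  (output_label2, label_dict, reverse_label_dict)

-- ===== PRECONDITION & SPEC =====
def Spec_get_output_label (input_text : List Int) (ant_span : List Int) (con_span : List Int) (out : List Int × (List (Int × String)) × (List (String × Int))) : Prop := out = get_output_label_alt input_text ant_span con_span
instance (input_text : List Int) (ant_span : List Int) (con_span : List Int) (out : List Int × (List (Int × String)) × (List (String × Int))) : Decidable (Spec_get_output_label input_text ant_span con_span out) := by unfold Spec_get_output_label; infer_instance

-- ===== CLAIM (what is proved, stated in full; the proofs are below) =====
def Claim_equal_get_output_label : Prop := ∀ (input_text : List Int) (ant_span : List Int) (con_span : List Int), Dom_get_output_label input_text ant_span con_span → Spec_get_output_label input_text ant_span con_span (get_output_label input_text ant_span con_span)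

-- ===== LEMMAS AND PROOFS =====

-- one pass of B's span loop preserves the length
theorem lenB (n v : Int) : ∀ (span : List Int) (acc : List Int),
    (span.foldl (fun acc i => if 0 ≤ i ∧ i < n then PySem.List.pySetD acc i v else acc) acc).length
      = acc.length := by
  intro span
  induction span with
  | nil => intro acc; rfl
  | cons i rest ih =>
    intro acc
    simp only [List.foldl_cons]
    rw [ih]
    split_ifs <;> simp [PySem.List.length_pySetD]

-- element j after A's update loop, for index pairs that are nonnegative and in range
theorem foldA_getElem? (ant con : List Int) : ∀ (l : List (Int × Int)) (acc : List Int),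
    (∀ p ∈ l, 0 ≤ p.1 ∧ p.1 < (acc.length : Int)) → ∀ (j : Nat),
    (l.foldl (fun acc p =>
      if p.1 ∈ ant then PySem.List.pySetD acc p.1 1
      else if p.1 ∈ con then PySem.List.pySetD acc p.1 2
      else acc) acc)[j]?
    = if (j : Int) ∈ l.map Prod.fst ∧ ((j : Int) ∈ ant ∨ (j : Int) ∈ con) then
        some (if (j : Int) ∈ ant then 1 else 2)
      else acc[j]? := by
  intro l
  induction l with
  | nil => intro acc _ j; simp
  | cons p rest ih =>
    intro acc hl j
    obtain ⟨hp0, hpn⟩ := hl p (List.mem_cons_self ..)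
    have hrest : ∀ q ∈ rest, 0 ≤ q.1 ∧ q.1 < ((if p.1 ∈ ant then PySem.List.pySetD acc p.1 1
        else if p.1 ∈ con then PySem.List.pySetD acc p.1 2 else acc).length : Int) := by
      intro q hq
      have := hl q (List.mem_cons_of_mem _ hq)
      split_ifs <;> simpa [PySem.List.length_pySetD] using this
    simp only [List.foldl_cons]
    rw [ih _ hrest]
    rw [PySem.List.pySetD_of_nonneg acc 1 hp0, PySem.List.pySetD_of_nonneg acc 2 hp0]
    by_cases hj : (j : Int) ∈ rest.map Prod.fst ∧ ((j : Int) ∈ ant ∨ (j : Int) ∈ con)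
    · have hm : (j : Int) ∈ (p :: rest).map Prod.fst := by
        simp only [List.map_cons, List.mem_cons]; exact Or.inr hj.1
      rw [if_pos hj, if_pos (show (j : Int) ∈ (p :: rest).map Prod.fst ∧ ((j : Int) ∈ ant ∨ (j : Int) ∈ con) from ⟨hm, hj.2⟩)]
    · rw [if_neg hj]
      by_cases hpj : p.1 = (j : Int)
      · -- the processed index IS j
        have hjlt : j < acc.length := by omega
        have htn : p.1.toNat = j := by omega
        by_cases hA : (j : Int) ∈ ant
        · rw [if_pos (hpj ▸ hA)]
          simp [hjlt, hpj, hA]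
        · rw [if_neg (fun h => hA (hpj ▸ h))]
          by_cases hC : (j : Int) ∈ con
          · rw [if_pos (hpj ▸ hC)]
            simp [hjlt, hpj, hA, hC]
          · rw [if_neg (fun h => hC (hpj ▸ h))]
            simp [hpj, hA, hC]
      · -- a different index: j's entry is untouched
        have hne : p.1.toNat ≠ j := by omega
        have hset1 : (acc.set p.1.toNat 1)[j]? = acc[j]? := by
          rw [List.getElem?_set_ne hne]
        have hset2 : (acc.set p.1.toNat 2)[j]? = acc[j]? := by
          rw [List.getElem?_set_ne hne]
        have hcond : ¬ ((j : Int) ∈ (p :: rest).map Prod.fst ∧ ((j : Int) ∈ ant ∨ (j : Int) ∈ con)) := by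
          simp only [List.map_cons, List.mem_cons]
          rintro ⟨h1 | h1, h2⟩
          · exact hpj h1.symm
          · exact hj ⟨h1, h2⟩
        rw [if_neg hcond]
        split_ifs <;> simp [hset1, hset2]

-- element j after one pass of B's span loop
theorem foldB_getElem? (v : Int) : ∀ (span : List Int) (acc : List Int) (n : Int),
    (acc.length : Int) = n → ∀ (j : Nat),
    (span.foldl (fun acc i => if 0 ≤ i ∧ i < n then PySem.List.pySetD acc i v else acc) acc)[j]?
    = if (j : Int) ∈ span ∧ (j : Int) < n then some v else acc[j]? := by
  intro span
  induction span with
  | nil => intro acc n _ j; simp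
  | cons i rest ih =>
    intro acc n hacc j
    have hlen : (((if 0 ≤ i ∧ i < n then PySem.List.pySetD acc i v else acc).length : Int)) = n := by
      split_ifs <;> simp [PySem.List.length_pySetD, hacc]
    simp only [List.foldl_cons]
    rw [ih _ n hlen]
    by_cases hj : (j : Int) ∈ rest ∧ (j : Int) < n
    · rw [if_pos hj, if_pos ⟨List.mem_cons_of_mem _ hj.1, hj.2⟩]
    · rw [if_neg hj]
      by_cases hij : i = (j : Int)
      · by_cases hjn : (j : Int) < n
        · have hg : 0 ≤ i ∧ i < n := by constructor <;> omega
          rw [if_pos hg, if_pos ⟨by simp [hij], hjn⟩]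
          rw [PySem.List.pySetD_of_nonneg acc v hg.1]
          have htn : i.toNat = j := by omega
          have hjlt : j < acc.length := by omega
          simp [htn, hjlt]
        · have hcond : ¬ ((j : Int) ∈ i :: rest ∧ (j : Int) < n) := fun h => hjn h.2
          rw [if_neg hcond]
          split_ifs with hg
          · rw [PySem.List.pySetD_of_nonneg acc v hg.1, List.getElem?_set_ne (by omega)]
          · rfl
      · have hcond : ¬ ((j : Int) ∈ i :: rest ∧ (j : Int) < n) := by
          rintro ⟨h1, h2⟩
          rcases List.mem_cons.mp h1 with h | h
          · exact hij h.symm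
          · exact hj ⟨h, h2⟩
        rw [if_neg hcond]
        split_ifs with hg
        · rw [PySem.List.pySetD_of_nonneg acc v hg.1, List.getElem?_set_ne (by omega)]
        · rfl

-- ===== VERDICT (by name: the statement is the Claim_ definition above) =====
theorem get_output_label_spec : Claim_equal_get_output_label := by
  unfold Claim_equal_get_output_label Spec_get_output_label
  intro input_text ant_span con_span _
  unfold get_output_label get_output_label_alt
  simp only []
  refine Prod.ext ?_ (by rfl)
  -- first component: pointwise equality
  have hOA : ((PySem.List.enumerate (["O", "A", "C"] : List String)).foldl
      (fun (d : PySem.Dict Int String × PySem.Dict String Int) p =>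
        (d.1.insert p.1 p.2, d.2.insert p.2 p.1))
      (PySem.Dict.empty, PySem.Dict.empty)).2.getD "A" 0 = 1 := rfl
  have hOC : ((PySem.List.enumerate (["O", "A", "C"] : List String)).foldl
      (fun (d : PySem.Dict Int String × PySem.Dict String Int) p =>
        (d.1.insert p.1 p.2, d.2.insert p.2 p.1))
      (PySem.Dict.empty, PySem.Dict.empty)).2.getD "O" 0 = 0 := rfl
  have hOCc : ((PySem.List.enumerate (["O", "A", "C"] : List String)).foldl
      (fun (d : PySem.Dict Int String × PySem.Dict String Int) p =>
        (d.1.insert p.1 p.2, d.2.insert p.2 p.1))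
      (PySem.Dict.empty, PySem.Dict.empty)).2.getD "C" 0 = 2 := rfl
  rw [hOA, hOC, hOCc]
  -- A's initial list is replicate n 0
  have hinit : (PySem.List.pyRange 0 (PySem.List.len input_text) 1).map
      (fun _ => (0 : Int)) = List.replicate input_text.length 0 := by
    rw [PySem.List.pyRange_one]
    simp [Function.comp_def]
  rw [hinit]
  apply List.ext_getElem?
  intro j
  rw [foldA_getElem? ant_span con_span _ _ (by
      intro p hp
      rcases (PySem.List.mem_enumerate_iff input_text 0 p).mp hp with ⟨k, hk, rfl⟩
      simp only [List.length_replicate]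
      constructor <;> omega)]
  rw [foldB_getElem? 1 ant_span _ _ (by
      rw [lenB]; simp)]
  rw [foldB_getElem? 2 con_span _ _ (by simp)]
  have hmf : ((j : Int) ∈ (PySem.List.enumerate input_text).map Prod.fst)
      ↔ (j : Int) < (input_text.length : Int) := by
    rw [show ((PySem.List.enumerate input_text).map Prod.fst : List Int)
        = (PySem.List.enumerate input_text).map (·.1) from rfl,
      PySem.List.map_fst_enumerate, PySem.List.mem_pyRange_one]
    constructor
    · rintro ⟨_, h⟩; simpa using h
    · intro h; exact ⟨by positivity, by simpa using h⟩
  have hrep : (List.replicate input_text.length (0 : Int))[j]?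
      = if (j : Int) < (input_text.length : Int) then some 0 else none := by
    by_cases h : j < input_text.length
    · rw [List.getElem?_replicate, if_pos h, if_pos (by exact_mod_cast h)]
    · rw [List.getElem?_replicate, if_neg h, if_neg (by omega)]
  rw [hrep]
  by_cases hn : (j : Int) < (input_text.length : Int)
  · by_cases hA : (j : Int) ∈ ant_span
    · simp [hmf, hn, hA]
    · by_cases hC : (j : Int) ∈ con_span <;> simp [hmf, hn, hA, hC]
  · simp [hmf, hn]
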